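-- pv_equiv track=rewrite | github.com/alexandredupontbouillard/projet_androide | Final/lecture_fichier.py | ma_partition
-- ===== SOURCE A (Python) =====
-- def ma_partition(sep,chaine):
--     result=[]
--     ch=chaine
--     for i in range(4):
--         c=ch.partition(sep)
--         result.append(c[0])
--         ch=c[2]
--     return result
-- ===== SOURCE B (Python) =====
-- def ma_partition(sep, chaine):
--     parts = chaine.split(sep)
--     return (parts + ['', '', '', ''])[:4]
-- ===== Notes on version B (the rewrite author's own statement) =====
-- stated objective: idiomatic
-- what changed: Replaces A's 4-iteration partition-and-advance loop with one full split(sep) followed by pad-with-empties-and-take-first-4.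
import Mathlib
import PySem

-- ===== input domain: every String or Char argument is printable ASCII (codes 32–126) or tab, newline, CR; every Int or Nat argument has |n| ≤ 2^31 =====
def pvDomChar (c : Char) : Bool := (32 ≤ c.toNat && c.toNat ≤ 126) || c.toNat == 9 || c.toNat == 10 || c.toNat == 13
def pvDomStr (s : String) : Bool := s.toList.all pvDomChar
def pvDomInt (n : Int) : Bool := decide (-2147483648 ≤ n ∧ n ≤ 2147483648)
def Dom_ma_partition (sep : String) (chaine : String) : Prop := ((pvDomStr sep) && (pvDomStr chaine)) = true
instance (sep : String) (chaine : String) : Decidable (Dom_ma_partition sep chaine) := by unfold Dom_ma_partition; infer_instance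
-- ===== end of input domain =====

-- B replaces A's 4-iteration partition-and-advance loop with one full split(sep)
-- followed by padding with empty strings and taking the first 4 (idiomatic, same cost).

-- ===== PORT A =====
-- Python's ch.partition(sep) for sep ≠ '': scan for the FIRST occurrence of sep;
-- (before, sep, after) if found, (ch, '', '') if not.  Exact for non-empty sep
-- (Python raises ValueError on sep = '', which Pre_ excludes).
def pyPartition (sep : List Char) : List Char → List Char × List Char × List Char
  | [] => ([], [], [])
  | c :: rest =>
    if sep.isPrefixOf (c :: rest) then ([], sep, (c :: rest).drop sep.length)
    else
      let p := pyPartition sep rest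
      (c :: p.1, p.2.1, p.2.2)

-- the 'for i in range(4)' loop: append c[0], advance ch to c[2]
def loopA (sep : List Char) : Nat → List Char → List String
  | 0, _ => []
  | n + 1, ch =>
    let c := pyPartition sep ch
    String.ofList c.1 :: loopA sep n c.2.2

-- 'result' is built by the obvious structural recursion over the same loop state
def ma_partition (sep : String) (chaine : String) : List String :=
  loopA sep.toList 4 chaine.toList

-- ===== PORT B =====
-- parts = chaine.split(sep); return (parts + ['','','',''])[:4]
-- (PySem.Chars.splitOn is Python's str.split(sep) for sep ≠ ''; Pre_ excludes sep = '')
def ma_partition_alt (sep : String) (chaine : String) : List String :=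
  let parts := (PySem.Chars.splitOn chaine.toList sep.toList).map String.ofList
  (parts ++ ["", "", "", ""]).take 4

-- ===== PRECONDITION & SPEC =====
-- Pre_ excludes exactly sep = '', on which Python's partition/split raise ValueError.
def Pre_ma_partition (sep : String) (chaine : String) : Prop := sep ≠ ""
instance (sep : String) (chaine : String) : Decidable (Pre_ma_partition sep chaine) := by
  unfold Pre_ma_partition; infer_instance

def pvWitness_ma_partition : String × String := (",", "a,b,c,d,e")

def Spec_ma_partition (sep : String) (chaine : String) (out : List String) : Prop := out = ma_partition_alt sep chaine
instance (sep : String) (chaine : String) (out : List String) : Decidable (Spec_ma_partition sep chaine out) := by unfold Spec_ma_partition; infer_instance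

-- ===== CLAIM (what is proved, stated in full; the proofs are below) =====
def Claim_equal_ma_partition : Prop := ∀ (sep : String) (chaine : String), Dom_ma_partition sep chaine → Pre_ma_partition sep chaine → Spec_ma_partition sep chaine (ma_partition sep chaine)

-- ===== LEMMAS AND PROOFS =====

-- structural reformulation of PySem.Chars.splitOn.go's scan (for non-empty sep)
def scanRec (sep : List Char) (l cur : List Char) : List (List Char) :=
  match l with
  | [] => [cur.reverse]
  | c :: rest =>
    if h : sep.isPrefixOf (c :: rest) = true ∧ sep ≠ [] then
      cur.reverse :: scanRec sep (rest.drop (sep.length - 1)) []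
    else scanRec sep rest (c :: cur)
termination_by l.length
decreasing_by all_goals (simp; try omega)

theorem go_spec (sep : List Char) (hs : sep ≠ []) :
    ∀ fuel l cur acc, l.length < fuel →
      PySem.Chars.splitOn.go sep fuel l cur acc = acc.reverse ++ scanRec sep l cur := by
  intro fuel
  induction fuel with
  | zero => intro l cur acc h; omega
  | succ f ih =>
    intro l cur acc h
    match l with
    | [] => simp [PySem.Chars.splitOn.go, scanRec]
    | c :: rest =>
      rw [PySem.Chars.splitOn.go]
      by_cases hp : sep.isPrefixOf (c :: rest) = true
      · rw [if_pos hp]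
        rw [scanRec, dif_pos ⟨hp, hs⟩]
        have hlen : sep.length ≥ 1 := by cases sep <;> simp_all
        have hdrop : (List.drop sep.length (c :: rest)) = rest.drop (sep.length - 1) := by
          cases sep with
          | nil => simp_all
          | cons a b => simp
        rw [hdrop, ih]
        · simp
        · simp at h ⊢
          have := List.length_drop (l := rest) (i := sep.length - 1)
          omega
      · rw [if_neg hp, scanRec]
        rw [dif_neg (by tauto), ih]
        simp at h; omega

theorem splitOn_eq_scanRec (sep l : List Char) (hs : sep ≠ []) :
    PySem.Chars.splitOn l sep = scanRec sep l [] := by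
  unfold PySem.Chars.splitOn
  rw [go_spec sep hs _ _ _ _ (by omega)]
  simp

theorem scanRec_eq_partition (sep : List Char) (hs : sep ≠ []) :
    ∀ l cur, scanRec sep l cur =
      (cur.reverse ++ (pyPartition sep l).1) ::
        (if (pyPartition sep l).2.1 = [] then []
         else scanRec sep (pyPartition sep l).2.2 []) := by
  intro l cur
  induction l, cur using scanRec.induct (sep := sep) with
  | case1 cur => simp [scanRec, pyPartition]
  | case2 cur c rest h =>
    rw [scanRec, dif_pos h]
    have hlen : sep.length ≥ 1 := by cases sep <;> simp_all
    have hdrop : (List.drop sep.length (c :: rest)) = rest.drop (sep.length - 1) := by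
      cases sep with
      | nil => simp_all
      | cons a b => simp
    simp only [pyPartition, if_pos h.1]
    rw [if_neg hs, hdrop]
    simp
  | case3 cur c rest h ih =>
    have hp : ¬ sep.isPrefixOf (c :: rest) = true := by tauto
    rw [scanRec, dif_neg h, ih]
    simp only [pyPartition, if_neg hp]
    simp

theorem pyPartition_not_found (sep : List Char) (hs : sep ≠ []) (l : List Char)
    (h : (pyPartition sep l).2.1 = []) :
    (pyPartition sep l).1 = l ∧ (pyPartition sep l).2.2 = [] := by
  induction l with
  | nil => simp [pyPartition]
  | cons c rest ih =>
    by_cases hp : sep.isPrefixOf (c :: rest) = true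
    · simp [pyPartition, hp] at h
      exact absurd h hs
    · simp [pyPartition, hp] at h ⊢
      exact ⟨(ih h).1, (ih h).2⟩

theorem loopA_nil (sep : List Char) (n : Nat) :
    loopA sep n [] = List.replicate n "" := by
  induction n with
  | zero => rfl
  | succ k ih => simp [loopA, pyPartition, ih, List.replicate_succ]

theorem loopA_eq (sep : List Char) (hs : sep ≠ []) :
    ∀ (n m : Nat), n ≤ m → ∀ ch,
      loopA sep n ch =
        (((PySem.Chars.splitOn ch sep).map String.ofList) ++ List.replicate m "").take n := by
  intro n
  induction n with
  | zero => intro m _ ch; rfl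
  | succ k ih =>
    intro m hm ch
    rw [splitOn_eq_scanRec sep ch hs, scanRec_eq_partition sep hs ch []]
    by_cases hfound : (pyPartition sep ch).2.1 = []
    · rw [if_pos hfound]
      obtain ⟨h1, h2⟩ := pyPartition_not_found sep hs ch hfound
      rw [loopA, h2, loopA_nil]
      simp [List.take_replicate]
      omega
    · rw [if_neg hfound]
      rw [loopA, ih m (by omega) ((pyPartition sep ch).2.2)]
      rw [splitOn_eq_scanRec sep _ hs]
      simp

-- ===== VERDICT (by name: the statement is the Claim_ definition above) =====
theorem ma_partition_spec : Claim_equal_ma_partition := by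
  intro sep chaine _ hpre
  unfold Spec_ma_partition ma_partition ma_partition_alt
  have hs : sep.toList ≠ [] := by
    intro h
    apply hpre
    have := congrArg String.ofList h
    simpa [String.ofList_toList] using this
  rw [loopA_eq sep.toList hs 4 4 (le_refl 4) chaine.toList]
  rfl
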